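-- pv_equiv track=rewrite | github.com/Linermao/ecoa-tools | app/services/distributed_debug.py | _derive_docker_subnet
-- ===== SOURCE A (Python) =====
-- from typing import Dict, List, Optional
--
-- def _derive_docker_subnet(addresses: List[str]) -> str:
--     if not addresses:
--         return ""
--
--     octets = [address.split(".") for address in addresses]
--     if all(parts[:3] == octets[0][:3] for parts in octets):
--         return ".".join(octets[0][:3] + ["0"]) + "/24"
--     if all(parts[:2] == octets[0][:2] for parts in octets):
--         return ".".join(octets[0][:2] + ["0", "0"]) + "/16"
--     if all(parts[:1] == octets[0][:1] for parts in octets):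
--         return ".".join(octets[0][:1] + ["0", "0", "0"]) + "/8"
--     raise ValueError("All nodes must share a common network prefix for Docker bridge generation")
-- ===== SOURCE B (Python) =====
-- from typing import List
--
--
-- def _derive_docker_subnet(addresses: List[str]) -> str:
--     if not addresses:
--         return ""
--
--     octets = [address.split(".") for address in addresses]
--     ref = octets[0]
--
--     # Shrink the shared prefix length while scanning the addresses once.
--     L = 3
--     for parts in octets[1:]:
--         while L and parts[:L] != ref[:L]:
--             L -= 1
--     if L == 0:
--         raise ValueError("All nodes must share a common network prefix for Docker bridge generation")
--
--     return ".".join(ref[:L] + ["0"] * (4 - L)) + f"/{8 * L}"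
-- ===== Notes on version B (the rewrite author's own statement) =====
-- stated objective: alternative
-- what changed: Replaces A's three independent whole-list all(parts[:k]==ref[:k]) scans (k=3,2,1) and three hand-written return branches by a single pass that shrinks the shared prefix length L while scanning, then builds the CIDR once from L (mask 8*L); Pre_ excludes only the inputs where A raises ValueError (no common first octet).
import Mathlib
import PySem

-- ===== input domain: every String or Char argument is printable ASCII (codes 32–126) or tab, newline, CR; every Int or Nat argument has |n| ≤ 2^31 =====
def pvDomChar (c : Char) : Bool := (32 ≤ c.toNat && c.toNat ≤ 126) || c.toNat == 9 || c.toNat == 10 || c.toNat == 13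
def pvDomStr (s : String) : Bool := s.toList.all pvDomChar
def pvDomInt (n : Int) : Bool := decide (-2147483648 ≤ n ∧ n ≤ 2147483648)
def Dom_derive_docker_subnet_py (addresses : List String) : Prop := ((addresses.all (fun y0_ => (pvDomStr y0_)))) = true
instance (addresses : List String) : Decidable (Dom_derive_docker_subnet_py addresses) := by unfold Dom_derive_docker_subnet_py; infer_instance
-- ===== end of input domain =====

-- B replaces A's three independent all(parts[:k]==ref[:k]) scans and three return branches by a
-- single pass that shrinks the shared prefix length L, then builds the CIDR once from L;
-- alternative decomposition, same cost. Where the Python raises ValueError both ports return "".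

-- ===== PORT A =====
-- address.split(".") — '.' is a fixed non-empty separator, so Chars.splitOn is the exact form
def pvSplitDot (s : String) : List String :=
  (PySem.Chars.splitOn s.toList ".".toList).map String.ofList

def derive_docker_subnet_py (addresses : List String) : String :=
  if addresses = [] then ""
  else
    let octets := addresses.map (fun address => pvSplitDot address)
    if octets.all (fun parts => parts.take 3 == octets.head!.take 3) then
      PySem.Str.join "." (octets.head!.take 3 ++ ["0"]) ++ "/24"
    else if octets.all (fun parts => parts.take 2 == octets.head!.take 2) then
      PySem.Str.join "." (octets.head!.take 2 ++ ["0", "0"]) ++ "/16"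
    else if octets.all (fun parts => parts.take 1 == octets.head!.take 1) then
      PySem.Str.join "." (octets.head!.take 1 ++ ["0", "0", "0"]) ++ "/8"
    else ""  -- Python: raise ValueError — excluded by Pre_

-- ===== PORT B =====
-- Source B's inner 'while L and parts[:L] != ref[:L]: L -= 1', as structural recursion on L
def pvShrink (ref parts : List String) : Nat → Nat
  | 0 => 0
  | k + 1 => if parts.take (k + 1) = ref.take (k + 1) then k + 1 else pvShrink ref parts k

def derive_docker_subnet_py_alt (addresses : List String) : String :=
  if addresses = [] then ""
  else
    let octets := addresses.map (fun address => pvSplitDot address)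
    let ref := octets.head!
    let L := (octets.drop 1).foldl (fun L parts => pvShrink ref parts L) 3
    if L = 0 then ""  -- Python: raise ValueError — excluded by Pre_
    else
      PySem.Str.join "." (ref.take L ++ List.replicate (4 - L) "0") ++ "/"
        ++ PySem.Int.toStr (8 * (L : Int))

-- ===== PRECONDITION & SPEC =====
-- Pre_ excludes exactly the inputs where the Python raises ValueError: a non-empty list in which
-- some address's first '.'-segment differs from the first address's first segment.
def Pre_derive_docker_subnet_py (addresses : List String) : Prop :=
  addresses = [] ∨
    ∀ s ∈ addresses,
      (pvSplitDot s).take 1 = (pvSplitDot addresses.head!).take 1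
instance (addresses : List String) : Decidable (Pre_derive_docker_subnet_py addresses) := by
  unfold Pre_derive_docker_subnet_py; infer_instance

def pvWitness_derive_docker_subnet_py : List String := ["10.0.1.2", "10.0.2.3"]

def Spec_derive_docker_subnet_py (addresses : List String) (out : String) : Prop := out = derive_docker_subnet_py_alt addresses
instance (addresses : List String) (out : String) : Decidable (Spec_derive_docker_subnet_py addresses out) := by unfold Spec_derive_docker_subnet_py; infer_instance

-- ===== CLAIM (what is proved, stated in full; the proofs are below) =====
def Claim_equal_derive_docker_subnet_py : Prop := ∀ (addresses : List String), Dom_derive_docker_subnet_py addresses → Pre_derive_docker_subnet_py addresses → Spec_derive_docker_subnet_py addresses (derive_docker_subnet_py addresses)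

-- ===== LEMMAS AND PROOFS =====

-- slice agreement is downward closed
lemma pvTake_mono (p r : List String) {j k : Nat} (h : j ≤ k)
    (he : p.take k = r.take k) : p.take j = r.take j := by
  have := congrArg (List.take j) he
  simpa [List.take_take, Nat.min_eq_left h] using this

-- characterisation of one while-loop step: the result is the largest j ≤ k that agrees (or 0)
lemma pvShrink_iff (ref p : List String) (k j : Nat) :
    j ≤ pvShrink ref p k ↔ j ≤ k ∧ (j = 0 ∨ p.take j = ref.take j) := by
  induction k with
  | zero =>
    simp only [pvShrink]
    exact ⟨fun h => ⟨h, Or.inl (by omega)⟩, fun h => h.1⟩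
  | succ k ih =>
    simp only [pvShrink]
    split_ifs with h
    · constructor
      · intro hj
        refine ⟨hj, ?_⟩
        by_cases hj0 : j = 0
        · exact Or.inl hj0
        · exact Or.inr (pvTake_mono _ _ hj h)
      · exact fun h => h.1
    · rw [ih]
      constructor
      · rintro ⟨hj, hc⟩; exact ⟨by omega, hc⟩
      · rintro ⟨hj, hc⟩
        refine ⟨?_, hc⟩
        rcases hc with rfl | hc
        · omega
        · rcases Nat.lt_or_ge j (k + 1) with h1 | h1
          · omega
          · exact absurd (by
              have hjk : j = k + 1 := by omega
              rw [← hjk]; exact hc) h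
lemma pvFold_shrink_ge (ref : List String) (l : List (List String)) (init j : Nat) :
    j ≤ l.foldl (fun L p => pvShrink ref p L) init ↔
      j ≤ init ∧ ∀ p ∈ l, j = 0 ∨ p.take j = ref.take j := by
  induction l generalizing init with
  | nil => simp
  | cons h t ih =>
    rw [List.foldl_cons, ih, pvShrink_iff]
    simp only [List.mem_cons]
    constructor
    · rintro ⟨⟨h1, h2⟩, h3⟩
      exact ⟨h1, fun p hp => by rcases hp with rfl | hp; exacts [h2, h3 p hp]⟩
    · rintro ⟨h1, h2⟩
      exact ⟨⟨h1, h2 h (Or.inl rfl)⟩, fun p hp => h2 p (Or.inr hp)⟩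

lemma pvSlash (s t : String) : s ++ "/" ++ t = s ++ ("/" ++ t) := by
  rw [String.append_assoc]

-- ===== VERDICT (by name: the statement is the Claim_ definition above) =====
theorem derive_docker_subnet_py_spec : Claim_equal_derive_docker_subnet_py := by
  intro addresses _hdom hpre
  unfold Spec_derive_docker_subnet_py
  rcases addresses with _ | ⟨a, rest⟩
  · rfl
  have hne : (a :: rest : List String) ≠ [] := by simp
  simp only [derive_docker_subnet_py, derive_docker_subnet_py_alt, if_neg hne, List.map_cons,
    List.head!_cons, List.drop_one, List.tail_cons]
  set ref := pvSplitDot a with href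
  set tail := rest.map (fun address => pvSplitDot address) with htail
  set octets := ref :: tail with hoct
  set L := tail.foldl (fun L parts => pvShrink ref parts L) 3 with hL
  have hLle : L ≤ 3 := ((pvFold_shrink_ge ref tail 3 L).1 le_rfl).1
  have hall : ∀ (k : Nat), 1 ≤ k → k ≤ 3 →
      ((octets.all fun parts => parts.take k == ref.take k) = true ↔ k ≤ L) := by
    intro k hk1 hk3
    rw [hL, pvFold_shrink_ge, List.all_eq_true, hoct]
    constructor
    · intro h
      refine ⟨hk3, fun p hp => Or.inr ?_⟩
      simpa using h p (List.mem_cons_of_mem ref hp)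
    · rintro ⟨_, h⟩ p hp
      rcases List.mem_cons.1 hp with rfl | hp
      · simp
      · rcases h p hp with h0 | heq
        · omega
        · simpa using heq
  have hpre1 : 1 ≤ L := by
    rw [hL, pvFold_shrink_ge]
    refine ⟨by omega, fun p hp => Or.inr ?_⟩
    rw [htail] at hp
    obtain ⟨s, hs, rfl⟩ := List.mem_map.1 hp
    rcases hpre with h | h
    · cases h
    · rw [href]; simpa using h s (List.mem_cons_of_mem a hs)
  have h3 := hall 3 (by omega) (by omega)
  have h2 := hall 2 (by omega) (by omega)
  have h1 := hall 1 (by omega) (by omega)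
  by_cases hc3 : (octets.all fun parts => List.take 3 parts == List.take 3 ref) = true
  · have hL3 : L = 3 := by have := h3.1 hc3; omega
    rw [if_pos hc3, hL3]
    norm_num [List.replicate, PySem.Int.toStr]
    rw [pvSlash]
    congr 1
  · rw [if_neg hc3]
    have hLlt3 : L < 3 := by
      by_contra hcon
      exact hc3 (h3.2 (by omega))
    by_cases hc2 : (octets.all fun parts => List.take 2 parts == List.take 2 ref) = true
    · have hL2 : L = 2 := by have := h2.1 hc2; omega
      rw [if_pos hc2, hL2]
      norm_num [List.replicate, PySem.Int.toStr]
      rw [pvSlash]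
      congr 1
    · rw [if_neg hc2]
      have hLlt2 : L < 2 := by
        by_contra hcon
        exact hc2 (h2.2 (by omega))
      have hL1 : L = 1 := by omega
      have hc1 : (octets.all fun parts => List.take 1 parts == List.take 1 ref) = true :=
        h1.2 (by omega)
      rw [if_pos hc1, hL1]
      norm_num [List.replicate, PySem.Int.toStr]
      rw [pvSlash]
      congr 1
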